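-- pv_equiv track=rewrite | github.com/Hitanshi-wappnet/DailyTask | String Programs/string_program[61-70].py | longest_common
-- ===== SOURCE A (Python) =====
-- def longest_common(string1, string2):
--     max_length = 0
--     list1 = string1.split()
--     list2 = string2.split()
--     list = []
--     for i in list1:
--         if i in list2:
--             list.append(i)
--     for ele in list:
--         if len(ele) > max_length:
--             max_element = ele
--         return max_element
-- ===== SOURCE B (Python) =====
-- def longest_common(string1, string2):
--     words2 = string2.split()
--     for word in string1.split():
--         if word in words2:
--             return word
--     return None
-- ===== Notes on version B (the rewrite author's own statement) =====
-- stated objective: simpler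
-- what changed: B returns the first word of string1 that occurs in string2 directly via an early return, instead of materializing the full list of common words and running a second loop whose unconditional return yields its first element.
import Mathlib
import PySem

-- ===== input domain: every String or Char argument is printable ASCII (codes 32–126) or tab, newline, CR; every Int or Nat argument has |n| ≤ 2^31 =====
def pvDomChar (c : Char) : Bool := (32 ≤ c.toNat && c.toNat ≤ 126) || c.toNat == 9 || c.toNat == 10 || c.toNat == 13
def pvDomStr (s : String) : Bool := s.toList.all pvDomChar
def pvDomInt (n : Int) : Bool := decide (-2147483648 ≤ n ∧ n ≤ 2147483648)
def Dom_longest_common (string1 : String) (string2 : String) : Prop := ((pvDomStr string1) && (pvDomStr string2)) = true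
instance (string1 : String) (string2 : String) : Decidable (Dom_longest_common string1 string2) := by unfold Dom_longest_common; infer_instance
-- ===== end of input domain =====

-- B replaces A's two-loop version (collect all common words, then a loop whose unconditional
-- return yields the first one) by a single early-returning scan; equivalence proved on Dom.


-- ===== PORT A =====
-- first loop: build the list of words of string1 that are in list2 (append-if fold);
-- second loop: on its first iteration, if len(ele) > 0 ( = max_length) set max_element,
-- then the loop-body 'return max_element' fires.  The 'else' arm would be an
-- UnboundLocalError in Python; it is unreachable since split() yields nonempty words,
-- and the port returns none there (no input on Dom reaches it).
def longest_common (string1 : String) (string2 : String) : Option String :=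
  let list1 := PySem.Str.split₀ string1
  let list2 := PySem.Str.split₀ string2
  let lst := list1.foldl (fun acc i => if list2.contains i then acc ++ [i] else acc) []
  match lst with
  | [] => none
  | ele :: _ => if PySem.Str.len ele > 0 then some ele else none

-- ===== PORT B =====
def longest_common_alt (string1 : String) (string2 : String) : Option String :=
  let words2 := PySem.Str.split₀ string2
  (PySem.Str.split₀ string1).find? (fun word => words2.contains word)

-- ===== PRECONDITION & SPEC =====
def Spec_longest_common (string1 : String) (string2 : String) (out : Option String) : Prop := out = longest_common_alt string1 string2
instance (string1 : String) (string2 : String) (out : Option String) : Decidable (Spec_longest_common string1 string2 out) := by unfold Spec_longest_common; infer_instance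

-- ===== CLAIM (what is proved, stated in full; the proofs are below) =====
def Claim_equal_longest_common : Prop := ∀ (string1 : String) (string2 : String), Dom_longest_common string1 string2 → Spec_longest_common string1 string2 (longest_common string1 string2)

-- ===== LEMMAS AND PROOFS =====

theorem foldl_append_if_nil {α : Type} (p : α → Bool) (l : List α) :
    l.foldl (fun acc i => if p i then acc ++ [i] else acc) [] = l.filter p := by
  simpa using PySem.List.foldl_append_if p id l []

theorem find?_eq_head?_filter {α : Type} (p : α → Bool) (l : List α) :
    l.find? p = (l.filter p).head? := by
  induction l with
  | nil => rfl
  | cons a t ih =>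
    by_cases h : p a
    · simp [List.find?, List.filter, h]
    · simp only [List.find?, List.filter, h]
      exact ih

theorem split₀go_words_ne_nil (s : List Char) :
    ∀ cur acc, (∀ w ∈ acc, w ≠ []) → ∀ w ∈ PySem.Chars.split₀.go s cur acc, w ≠ [] := by
  induction s with
  | nil =>
    intro cur acc hacc w hw
    unfold PySem.Chars.split₀.go at hw
    by_cases h : cur.isEmpty
    · simp [h] at hw; exact hacc w hw
    · simp [h] at hw
      rcases hw with hw | hw
      · exact hacc w hw
      · subst hw; simpa [List.isEmpty_iff] using h
  | cons c rest ih =>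
    intro cur acc hacc w hw
    unfold PySem.Chars.split₀.go at hw
    by_cases hs : PySem.Chars.isspace c
    · by_cases h : cur.isEmpty
      · simp [hs, h] at hw; exact ih [] acc hacc w hw
      · simp [hs, h] at hw
        refine ih [] (cur.reverse :: acc) ?_ w hw
        intro v hv
        cases hv with
        | head => simpa [List.isEmpty_iff] using h
        | tail _ hv => exact hacc v hv
    · simp [hs] at hw; exact ih (c :: cur) acc hacc w hw

theorem split₀_words_ne_empty (s : String) :
    ∀ w ∈ PySem.Str.split₀ s, PySem.Str.len w > 0 := by
  intro w hw
  simp [PySem.Str.split₀] at hw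
  obtain ⟨cs, hcs, rfl⟩ := hw
  have hne : cs ≠ [] :=
    split₀go_words_ne_nil s.toList [] [] (by simp) cs (by simpa [PySem.Chars.split₀] using hcs)
  have : 0 < cs.length := List.length_pos_iff.mpr hne
  simpa [PySem.Str.len] using this

theorem split₀_words_ne_empty' (s : String) :
    ∀ w ∈ PySem.Str.split₀ s, w ≠ "" := by
  intro w hw h
  have := split₀_words_ne_empty s w hw
  rw [h] at this
  simp [PySem.Str.len] at this

-- ===== VERDICT (by name: the statement is the Claim_ definition above) =====
theorem longest_common_spec : Claim_equal_longest_common := by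
  intro string1 string2 _
  unfold Spec_longest_common longest_common longest_common_alt
  dsimp only
  rw [foldl_append_if_nil, find?_eq_head?_filter]
  cases hf : ((PySem.Str.split₀ string1).filter
      (fun word => (PySem.Str.split₀ string2).contains word)) with
  | nil => simp
  | cons ele rest =>
    have hmem : ele ∈ PySem.Str.split₀ string1 :=
      List.mem_of_mem_filter (p := fun word => (PySem.Str.split₀ string2).contains word)
        (hf ▸ List.mem_cons_self)
    simp [split₀_words_ne_empty' string1 ele hmem]
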